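-- pv_equiv track=rewrite | github.com/letminjae/PCCP | Programmers/LV3/250910/jewel_shopping.py | solution
-- ===== SOURCE A (Python) =====
-- def solution(gems):
--     set_gems = set(gems)
--     dict_gems = {}
--
--     answer = []
--     start = 0
--     end = 0
--
--     while end < len(gems):
--         if gems[end] in dict_gems:
--             dict_gems[gems[end]] += 1
--         else:
--             dict_gems[gems[end]] = 1
--
--         # 최소 구간 찾기위해 start 늘려서 answer 저장
--         while len(dict_gems) == len(set_gems):
--             answer.append([start + 1, end + 1])
--
--             dict_gems[gems[start]] -= 1
--
--             if dict_gems[gems[start]] == 0: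
--                 del dict_gems[gems[start]]
--
--             start += 1
--
--         end += 1
--
--     # 구간의 길이가 가장 짧은 순서로 정렬
--     answer.sort(key=lambda x: x[1]-x[0])
--     return answer[0]
-- ===== SOURCE B (Python) =====
-- def solution(gems):
--     kinds = len(set(gems))
--     window = {}
--     best = None
--     start = 0
--     for end, gem in enumerate(gems):
--         window[gem] = window.get(gem, 0) + 1
--         while len(window) == kinds:
--             if best is None or end - start < best[1] - best[0]:
--                 best = [start + 1, end + 1]
--             window[gems[start]] -= 1
--             if window[gems[start]] == 0:
--                 del window[gems[start]]
--             start += 1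
--     return best
-- ===== Notes on version B (the rewrite author's own statement) =====
-- stated objective: faster
-- what changed: A appends every covering window to a list and then sorts it by length to take the shortest; B tracks the best interval inline in the sliding window with a strict-less comparison (which keeps the first minimum, matching A's stable sort), so no candidate list and no sort.
-- outside the precondition, e.g. on solution([]): A raises IndexError, B returns None
import Mathlib
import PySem

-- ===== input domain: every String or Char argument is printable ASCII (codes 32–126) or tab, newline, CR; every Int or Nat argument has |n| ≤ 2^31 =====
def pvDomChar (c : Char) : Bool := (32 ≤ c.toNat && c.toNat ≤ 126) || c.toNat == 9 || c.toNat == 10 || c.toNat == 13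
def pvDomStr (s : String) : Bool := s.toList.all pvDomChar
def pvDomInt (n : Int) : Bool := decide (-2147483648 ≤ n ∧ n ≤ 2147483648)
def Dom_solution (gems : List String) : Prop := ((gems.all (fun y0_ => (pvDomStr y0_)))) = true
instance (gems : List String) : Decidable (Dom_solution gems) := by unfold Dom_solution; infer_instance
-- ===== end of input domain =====

-- B replaces A's "collect every covering window, then sort by length and take the head" with
-- inline strict-less best-interval tracking in the same sliding window (no candidate list, no sort).

-- ===== PORT A =====
-- inner `while len(dict_gems) == len(set_gems)` loop; the fuel is a port artifact: `start` grows by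
-- one per iteration and never passes len(gems), so fuel len(gems)+1 is never exhausted on reachable
-- states.  gems[start] is always in range there, so pyGetD with default "" is exact.
def solInner (gems : List String) (kinds : Nat) (e : Int) :
    Nat → Int → PySem.Dict String Int → List (List Int) →
      Int × PySem.Dict String Int × List (List Int)
  | 0, start, d, ans => (start, d, ans)
  | fuel+1, start, d, ans =>
    if d.size = kinds then
      let ans' := ans ++ [[start + 1, e + 1]]
      let g := PySem.List.pyGetD gems start ""
      let d1 := d.insert g (d.getD g 0 - 1)
      let d2 := if d1.getD g 0 = 0 then d1.erase g else d1
      solInner gems kinds e fuel (start + 1) d2 ans'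
    else (start, d, ans)

-- `while end < len(gems)` loop of A
def solOuter (gems : List String) (kinds : Nat) (e : Nat) (start : Int)
    (d : PySem.Dict String Int) (ans : List (List Int)) : List (List Int) :=
  if h : e < gems.length then
    solOuter gems kinds (e+1)
      (solInner gems kinds (e : Int) (gems.length + 1) start
        (if d.contains gems[e] then d.insert gems[e] (d.getD gems[e] 0 + 1)
         else d.insert gems[e] 1) ans).1
      (solInner gems kinds (e : Int) (gems.length + 1) start
        (if d.contains gems[e] then d.insert gems[e] (d.getD gems[e] 0 + 1)
         else d.insert gems[e] 1) ans).2.1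
      (solInner gems kinds (e : Int) (gems.length + 1) start
        (if d.contains gems[e] then d.insert gems[e] (d.getD gems[e] 0 + 1)
         else d.insert gems[e] 1) ans).2.2
  else ans
termination_by gems.length - e

-- A's sort key  lambda x: x[1]-x[0]
def solKey (x : List Int) : Int := PySem.List.pyGetD x 1 0 - PySem.List.pyGetD x 0 0

def solution (gems : List String) : List Int :=
  let ans := solOuter gems (PySem.Set.ofList gems).length 0 0 PySem.Dict.empty []
  -- answer[0]: IndexError when answer is empty — that happens exactly for gems = [], which
  -- Pre_solution excludes; [] stands for the raise.
  (PySem.List.sorted ans solKey false).headD []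

-- ===== PORT B =====
-- inner shrink loop of B: same window bookkeeping, but the best interval is updated inline
-- (strict-less keeps the earlier one).  Fuel as in solInner.
def altInner (gems : List String) (kinds : Nat) (e : Int) :
    Nat → Int → PySem.Dict String Int → Option (List Int) →
      Int × PySem.Dict String Int × Option (List Int)
  | 0, start, w, best => (start, w, best)
  | fuel+1, start, w, best =>
    if w.size = kinds then
      let best' := match best with
        | none => some [start + 1, e + 1]
        | some b =>
            if e - start < PySem.List.pyGetD b 1 0 - PySem.List.pyGetD b 0 0 then
              some [start + 1, e + 1]
            else some b
      let g := PySem.List.pyGetD gems start ""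
      let w1 := w.insert g (w.getD g 0 - 1)
      let w2 := if w1.getD g 0 = 0 then w1.erase g else w1
      altInner gems kinds e fuel (start + 1) w2 best'
    else (start, w, best)

def solution_alt (gems : List String) : List Int :=
  let kinds := (PySem.Set.ofList gems).length
  let r := (PySem.List.enumerate gems 0).foldl
    (fun (st : Int × PySem.Dict String Int × Option (List Int)) p =>
      let w1 := st.2.1.insert p.2 (st.2.1.getD p.2 0 + 1)  -- window[gem] = window.get(gem, 0) + 1
      altInner gems kinds p.1 (gems.length + 1) st.1 w1 st.2.2)
    (0, PySem.Dict.empty, none)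
  -- B returns `best`, still None only for gems = [] (excluded by Pre_solution); [] stands for None.
  r.2.2.getD []

-- ===== PRECONDITION & SPEC =====
-- Pre_ excludes only gems = [], on which A raises IndexError (answer[0] of an empty list).
def Pre_solution (gems : List String) : Prop := gems ≠ []
instance (gems : List String) : Decidable (Pre_solution gems) := by unfold Pre_solution; infer_instance
def pvWitness_solution : List String := (["a", "b", "a"])

def Spec_solution (gems : List String) (out : List Int) : Prop := out = solution_alt gems
instance (gems : List String) (out : List Int) : Decidable (Spec_solution gems out) := by unfold Spec_solution; infer_instance

-- ===== CLAIM (what is proved, stated in full; the proofs are below) =====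
def Claim_equal_solution : Prop := ∀ (gems : List String), Dom_solution gems → Pre_solution gems → Spec_solution gems (solution gems)

-- ===== LEMMAS AND PROOFS =====

-- the strict-min accumulator B maintains, as a fold step over A's candidate list
def upd (b : Option (List Int)) (x : List Int) : Option (List Int) :=
  match b with
  | none => some x
  | some b => if solKey x < solKey b then some x else some b

lemma solKey_pair (s e : Int) : solKey [s + 1, e + 1] = e - s := by
  simp [solKey, PySem.List.pyGetD]

-- inner simulation: B's inner loop computes the strict-min fold of A's inner loop's answers
lemma inner_sim (gems : List String) (kinds : Nat) (e : Int) :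
    ∀ (fuel : Nat) (start : Int) (d : PySem.Dict String Int) (ans : List (List Int)),
      altInner gems kinds e fuel start d (ans.foldl upd none) =
        ((solInner gems kinds e fuel start d ans).1,
         (solInner gems kinds e fuel start d ans).2.1,
         (solInner gems kinds e fuel start d ans).2.2.foldl upd none) := by
  intro fuel
  induction fuel with
  | zero => intro start d ans; simp [altInner, solInner]
  | succ n ih =>
    intro start d ans
    by_cases h : d.size = kinds
    · have hbest : (match ans.foldl upd none with
        | none => some [start + 1, e + 1]
        | some b =>
            if e - start < PySem.List.pyGetD b 1 0 - PySem.List.pyGetD b 0 0 then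
              some [start + 1, e + 1]
            else some b) = (ans ++ [[start + 1, e + 1]]).foldl upd none := by
        rw [List.foldl_append]
        cases ans.foldl upd none with
        | none => simp [upd]
        | some b =>
          simp only [List.foldl_cons, List.foldl_nil, upd, solKey_pair]
          simp only [solKey]
          rfl
      simp only [altInner, solInner, h, if_true]
      rw [hbest]
      exact ih _ _ _
    · simp [altInner, solInner, h]

-- outer simulation: folding B's step over enumerate(gems.drop e, e) tracks A's outer loop
lemma outer_sim (gems : List String) (kinds : Nat) :
    ∀ (rest : List String) (e : Nat) (start : Int) (d : PySem.Dict String Int)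
      (ans : List (List Int)), gems.drop e = rest →
      ((PySem.List.enumerate rest (e : Int)).foldl
        (fun (st : Int × PySem.Dict String Int × Option (List Int)) p =>
          let w1 := st.2.1.insert p.2 (st.2.1.getD p.2 0 + 1)
          altInner gems kinds p.1 (gems.length + 1) st.1 w1 st.2.2)
        (start, d, ans.foldl upd none)).2.2 =
      (solOuter gems kinds e start d ans).foldl upd none := by
  intro rest
  induction rest with
  | nil =>
    intro e start d ans hdrop
    have he : ¬ e < gems.length := by
      intro h
      have := List.drop_eq_nil_iff.mp hdrop
      omega
    simp [PySem.List.enumerate, solOuter, he]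
  | cons x rest ih =>
    intro e start d ans hdrop
    have he : e < gems.length := by
      by_contra h
      rw [List.drop_eq_nil_of_le (by omega)] at hdrop
      simp at hdrop
    have hx : gems[e] = x := by
      have h0 : gems[e]? = some x := by
        have h1 : (gems.drop e)[0]? = gems[e + 0]? := List.getElem?_drop
        simpa [hdrop] using h1.symm
      rw [List.getElem?_eq_getElem he] at h0
      exact Option.some.inj h0
    have hdrop' : gems.drop (e + 1) = rest := by
      have h1 : gems.drop (e + 1) = (gems.drop e).drop 1 := by
        rw [List.drop_drop]
      simpa [hdrop] using h1
    -- B's unconditional counting insert equals A's membership-tested branch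
    have hdict : (if d.contains x then d.insert x (d.getD x 0 + 1) else d.insert x 1) =
        d.insert x (d.getD x 0 + 1) := by
      by_cases hc : d.contains x
      · rw [if_pos hc]
      · rw [if_neg (by simpa using hc),
          PySem.Dict.getD_of_not_contains d 0 (by simpa using hc)]
        norm_num
    conv_rhs => rw [solOuter]
    rw [dif_pos he, hx, hdict]
    rw [PySem.List.enumerate_cons, List.foldl_cons]
    simp only [inner_sim gems kinds]
    rw [show ((e : Int) + 1) = ((e + 1 : Nat) : Int) by push_cast; ring]
    exact ih (e + 1) _ _ _ hdrop'

-- the head of A's stable insertion sort is the strict-min fold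
lemma head?_insertBy (x : List Int) (acc : List (List Int)) :
    (PySem.List.insertBy (fun a b => decide (solKey a < solKey b)) x acc).head? =
      upd acc.head? x := by
  cases acc with
  | nil => simp [PySem.List.insertBy, upd]
  | cons h t =>
    by_cases hlt : solKey x < solKey h
    · simp [PySem.List.insertBy, upd, hlt]
    · simp [PySem.List.insertBy, upd, hlt]

lemma head?_foldl_insertBy :
    ∀ (xs acc : List (List Int)),
      ((xs.foldl (fun acc x =>
          PySem.List.insertBy (fun a b => decide (solKey a < solKey b)) x acc) acc).head?) =
        xs.foldl upd acc.head? := by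
  intro xs
  induction xs with
  | nil => intro acc; rfl
  | cons x xs ih =>
    intro acc
    rw [List.foldl_cons, List.foldl_cons, ih, head?_insertBy]

lemma sorted_headD_eq_fold (xs : List (List Int)) :
    (PySem.List.sorted xs solKey false).headD [] = (xs.foldl upd none).getD [] := by
  rw [PySem.List.sorted_eq_foldl_insertBy]
  rw [List.headD_eq_head?_getD, head?_foldl_insertBy xs []]
  rfl

-- ===== VERDICT (by name: the statement is the Claim_ definition above) =====
theorem solution_spec : Claim_equal_solution := by
  intro gems _ _
  unfold Spec_solution solution solution_alt
  rw [sorted_headD_eq_fold]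
  rw [← outer_sim gems (PySem.Set.ofList gems).length gems 0 0 PySem.Dict.empty [] (by simp)]
  rfl
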